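-- pv_equiv track=rewrite | github.com/namvdo/set-valued-viz | src/py/func_equation.py | iterate_top_clusters
-- ===== SOURCE A (Python) =====
-- def find_parenthesis_end(string, start_index):
--     index = len(string)-1
--     closure = -int(string[start_index]=="(")
--     for i in range(len(string)-start_index):
--         c = string[start_index+i]
--         match c:
--             case "(": closure += 1
--             case ")": closure -= 1
--         if closure<0:
--             index = start_index+i
--             break
--     return index
--
-- def iterate_top_clusters(equation):
--     ops = "+-"
--     prev = ""
--     temp = ""
--
--     ii = 0
--     for i,c in enumerate(equation):
--         if ii>0:
--             ii -= 1
--             continue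
--         if c in ops:
--             if temp and temp not in ops:
--                 if prev:
--                     if temp.startswith("**"):
--                         yield prev+temp
--                         temp = ""
--                     else: yield prev
--                 prev = temp
--                 temp = ""
--             temp += c
--         elif c=="(":
--             ii = find_parenthesis_end(equation, i)
--             temp += equation[i:ii+1]
--             ii -= i
--         else: temp += c
--
--     if prev:
--         if temp.startswith("**"):
--             yield prev+temp
--             temp = ""
--         else: yield prev
--     yield temp
-- ===== SOURCE B (Python) =====
-- def iterate_top_clusters(equation):
--     ops = "+-"
--     # phase 1: one depth-counting pass cuts the equation into raw atoms
--     # (each top-level '+'/'-' starts a new atom; parenthesized groups stay intact)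
--     atoms = []
--     cur = []
--     depth = 0
--     for c in equation:
--         if depth == 0 and c in ops:
--             atoms.append(''.join(cur))
--             cur = [c]
--         else:
--             cur.append(c)
--             if c == '(':
--                 depth += 1
--             elif c == ')' and depth > 0:
--                 depth -= 1
--     atoms.append(''.join(cur))
--     # phase 2: grouping pass over the atoms (prev/temp buffer with '**' merge)
--     prev = ""
--     temp = atoms[0]
--     for a in atoms[1:]:
--         if temp and temp not in ops:
--             if prev:
--                 if temp.startswith("**"):
--                     yield prev + temp
--                     temp = ""
--                 else:
--                     yield prev
--             prev = temp
--             temp = ""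
--         temp += a
--     if prev:
--         if temp.startswith("**"):
--             yield prev + temp
--             temp = ""
--         else:
--             yield prev
--     yield temp
-- ===== Notes on version B (the rewrite author's own statement) =====
-- stated objective: alternative
-- what changed: Replaces A's single scan with a find_parenthesis_end lookahead helper and an ii-skip continue trick by two separate linear passes: a depth-counting pass that cuts the equation into top-level raw atoms, then a grouping pass over those atoms reproducing the prev/temp buffer and the merge of a power-prefixed atom into its predecessor.
import Mathlib
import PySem

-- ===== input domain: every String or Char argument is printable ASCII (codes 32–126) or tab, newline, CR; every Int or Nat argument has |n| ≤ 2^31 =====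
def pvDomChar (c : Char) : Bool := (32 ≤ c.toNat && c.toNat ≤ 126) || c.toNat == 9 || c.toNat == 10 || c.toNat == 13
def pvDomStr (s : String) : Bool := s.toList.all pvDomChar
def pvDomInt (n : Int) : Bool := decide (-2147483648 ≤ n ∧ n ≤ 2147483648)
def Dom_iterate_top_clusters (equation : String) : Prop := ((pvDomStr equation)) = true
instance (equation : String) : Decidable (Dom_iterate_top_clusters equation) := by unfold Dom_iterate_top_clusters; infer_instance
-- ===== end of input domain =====

-- B replaces A's lookahead helper + index-skipping single loop by two separate linear passes
-- (a depth-counting split into top-level atoms, then a grouping pass over the atoms); same yields.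
-- A is a generator; the equivalence is about the yielded sequence (list of yields).

-- ===== PORT A =====
-- find_parenthesis_end's loop `for i in range(len(string)-start)` with break, as a recursion
-- over the suffix string[start:] carrying the running index and closure counter.
def fpeGo (start : Nat) (j : Nat) (closure : Int) (suffix : List Char) : Option Nat :=
  match suffix with
  | [] => none
  | c :: cs =>
    let closure' := closure + (if c = '(' then 1 else if c = ')' then -1 else 0)
    if closure' < 0 then some (start + j) else fpeGo start (j + 1) closure' cs

-- `string[start]` is only ever read at a valid index by the caller; pyGet? is exact there.
def find_parenthesis_end (s : List Char) (start : Nat) : Nat :=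
  let closure : Int := if PySem.List.pyGet? s (start : Int) = some '(' then -1 else 0
  match fpeGo start 0 closure (s.drop start) with
  | some idx => idx
  | none => s.length - 1

-- A's main loop over enumerate(equation) with the `ii`-skip `continue`, as a recursion on the
-- remaining characters (the skip of ii-i characters is `cs.drop (ii - i)`); yields accumulate in out.
def goA (eq : List Char) (i : Nat) (rest : List Char) (prev temp : List Char)
    (out : List (List Char)) : List (List Char) :=
  match rest with
  | [] =>
      if prev ≠ [] then
        if PySem.Chars.startswith temp ['*', '*'] then out ++ [prev ++ temp] ++ [([] : List Char)]
        else out ++ [prev] ++ [temp]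
      else out ++ [temp]
  | c :: cs =>
    if c = '+' ∨ c = '-' then
      if temp ≠ [] ∧ PySem.Chars.isIn temp ['+', '-'] = false then
        if prev ≠ [] then
          if PySem.Chars.startswith temp ['*', '*'] then
            goA eq (i + 1) cs [] [c] (out ++ [prev ++ temp])
          else goA eq (i + 1) cs temp [c] (out ++ [prev])
        else goA eq (i + 1) cs temp [c] out
      else goA eq (i + 1) cs prev (temp ++ [c]) out
    else if c = '(' then
      let ii := find_parenthesis_end eq i
      goA eq (ii + 1) (cs.drop (ii - i)) prev
        (temp ++ PySem.List.slice eq (some (i : Int)) (some ((ii + 1 : Nat) : Int))) out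
    else goA eq (i + 1) cs prev (temp ++ [c]) out
termination_by rest.length
decreasing_by
  all_goals simp

def iterate_top_clusters (equation : String) : List String :=
  (goA equation.toList 0 equation.toList [] [] []).map String.ofList

-- ===== PORT B =====
-- phase 1: one depth-counting pass cutting the string into raw atoms at top-level '+'/'-'
def splitAux (chars : List Char) (depth : Int) (cur : List Char)
    (atoms : List (List Char)) : List (List Char) :=
  match chars with
  | [] => atoms ++ [cur]
  | c :: cs =>
    if depth = 0 ∧ (c = '+' ∨ c = '-') then splitAux cs 0 [c] (atoms ++ [cur])
    else splitAux cs
        (if c = '(' then depth + 1 else if c = ')' ∧ depth > 0 then depth - 1 else depth)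
        (cur ++ [c]) atoms

-- phase 2: the grouping pass over the atoms (prev/temp buffer with the '**' merge)
def groupRun (atoms : List (List Char)) (prev temp : List Char)
    (out : List (List Char)) : List (List Char) :=
  match atoms with
  | [] =>
      if prev ≠ [] then
        if PySem.Chars.startswith temp ['*', '*'] then out ++ [prev ++ temp] ++ [([] : List Char)]
        else out ++ [prev] ++ [temp]
      else out ++ [temp]
  | a :: as =>
      if temp ≠ [] ∧ PySem.Chars.isIn temp ['+', '-'] = false then
        if prev ≠ [] then
          if PySem.Chars.startswith temp ['*', '*'] then groupRun as [] a (out ++ [prev ++ temp])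
          else groupRun as temp a (out ++ [prev])
        else groupRun as temp a out
      else groupRun as prev (temp ++ a) out

def iterate_top_clusters_alt (equation : String) : List String :=
  (match splitAux equation.toList 0 [] [] with
   | [] => []
   | t :: ts => groupRun ts [] t []).map String.ofList

-- ===== PRECONDITION & SPEC =====
def Spec_iterate_top_clusters (equation : String) (out : List String) : Prop := out = iterate_top_clusters_alt equation
instance (equation : String) (out : List String) : Decidable (Spec_iterate_top_clusters equation out) := by unfold Spec_iterate_top_clusters; infer_instance

-- ===== CLAIM (what is proved, stated in full; the proofs are below) =====
def Claim_equal_iterate_top_clusters : Prop := ∀ (equation : String), Dom_iterate_top_clusters equation → Spec_iterate_top_clusters equation (iterate_top_clusters equation)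

-- ===== LEMMAS AND PROOFS =====

def hdCons (p : List Char) : List (List Char) → List (List Char)
  | [] => [p]
  | h :: t => (p ++ h) :: t

def feed (atoms : List (List Char)) (prev temp : List Char) (out : List (List Char)) : List (List Char) :=
  match atoms with
  | [] => out
  | h :: t => groupRun t prev (temp ++ h) out

theorem splitAux_append (cs : List Char) : ∀ (d : Int) (cur : List Char) (atoms : List (List Char)),
    splitAux cs d cur atoms = atoms ++ splitAux cs d cur [] := by
  induction cs with
  | nil => intro d cur atoms; simp [splitAux]
  | cons c cs ih =>
    intro d cur atoms
    simp only [splitAux]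
    split_ifs with h
    · rw [ih _ _ (atoms ++ [cur]), ih _ _ ([] ++ [cur])]
      simp
    all_goals exact ih _ _ _

theorem hdCons_hdCons (a b : List Char) (S : List (List Char)) :
    hdCons (a ++ b) S = hdCons a (hdCons b S) := by
  cases S <;> simp [hdCons]

theorem splitAux_cur (cs : List Char) : ∀ (d : Int) (cur : List Char),
    splitAux cs d cur [] = hdCons cur (splitAux cs d [] []) := by
  induction cs with
  | nil => intro d cur; simp [splitAux, hdCons]
  | cons c cs ih =>
    intro d cur
    simp only [splitAux]
    split_ifs with h
    · rw [splitAux_append _ _ _ ([] ++ [cur]), splitAux_append _ _ _ ([] ++ [[]])]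
      simp [hdCons]
    · rw [ih, ih _ ([] ++ [c])]
      simp [← hdCons_hdCons]
    all_goals rw [ih, ih _ ([] ++ [c])]; simp [← hdCons_hdCons]

theorem splitAux_ne_nil (cs : List Char) : ∀ (d : Int) (cur : List Char) (atoms : List (List Char)),
    splitAux cs d cur atoms ≠ [] := by
  induction cs with
  | nil => intro d cur atoms; simp [splitAux]
  | cons c cs ih =>
    intro d cur atoms
    simp only [splitAux]
    split_ifs with h
    all_goals exact ih _ _ _

theorem fpeGo_split (cs : List Char) : ∀ (start j : Nat) (c : Int), 0 ≤ c →
    (∀ idx, fpeGo start j c cs = some idx → start + j ≤ idx ∧ idx - (start + j) < cs.length) ∧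
    (∀ (cur : List Char) (atoms : List (List Char)),
      splitAux cs (c + 1) cur atoms =
        match fpeGo start j c cs with
        | some idx => splitAux (cs.drop (idx - (start + j) + 1)) 0
            (cur ++ cs.take (idx - (start + j) + 1)) atoms
        | none => atoms ++ [cur ++ cs]) := by
  induction cs with
  | nil =>
    intro start j c hc
    constructor
    · intro idx h; simp [fpeGo] at h
    · intro cur atoms; simp [fpeGo, splitAux]
  | cons x xs ih =>
    intro start j c hc
    by_cases hneg : c + (if x = '(' then 1 else if x = ')' then -1 else 0) < 0
    · -- matching close: x = ')' and c = 0
      have hfpe : fpeGo start j c (x :: xs) = some (start + j) := by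
        simp only [fpeGo]; rw [if_pos hneg]
      have hx' : x = ')' := by
        by_contra hxne
        by_cases hxp : x = '('
        · rw [if_pos hxp] at hneg; omega
        · rw [if_neg hxp, if_neg hxne] at hneg; omega
      have hd : (if x = '(' then (1:Int) else if x = ')' then -1 else 0) = -1 := by
        subst hx'; decide
      rw [hd] at hneg
      have hc0 : c = 0 := by omega
      constructor
      · intro idx h
        rw [hfpe] at h
        injection h with h
        subst h
        simp
      · intro cur atoms
        rw [hfpe]
        simp only [splitAux]
        rw [if_neg (by rintro ⟨h1, -⟩; omega)]
        subst hc0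
        simp [hx']
    · have hc' : 0 ≤ c + (if x = '(' then 1 else if x = ')' then -1 else 0) := by omega
      have hfpe : fpeGo start j c (x :: xs) =
          fpeGo start (j + 1) (c + (if x = '(' then 1 else if x = ')' then -1 else 0)) xs := by
        simp only [fpeGo, if_neg hneg]
      have hdepth : (if x = '(' then (c + 1) + 1 else if x = ')' ∧ (c + 1) > 0 then (c + 1) - 1 else (c + 1))
          = (c + (if x = '(' then 1 else if x = ')' then -1 else 0)) + 1 := by
        split_ifs
        all_goals try omega
        all_goals simp_all
      have hstep : ∀ cur atoms, splitAux (x :: xs) (c + 1) cur atoms =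
          splitAux xs ((c + (if x = '(' then 1 else if x = ')' then -1 else 0)) + 1) (cur ++ [x]) atoms := by
        intro cur atoms
        simp only [splitAux]
        rw [if_neg (by omega : ¬(c + 1 = 0 ∧ (x = '+' ∨ x = '-'))), hdepth]
      obtain ⟨ihb, ihs⟩ := ih start (j + 1) _ hc'
      constructor
      · intro idx h
        rw [hfpe] at h
        obtain ⟨h1, h2⟩ := ihb idx h
        refine ⟨by omega, ?_⟩
        simp only [List.length_cons]
        omega
      · intro cur atoms
        rw [hfpe, hstep]
        rcases hf : fpeGo start (j + 1) (c + (if x = '(' then 1 else if x = ')' then -1 else 0)) xs with _ | idx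
        · have h2 := ihs (cur ++ [x]) atoms
          rw [hf] at h2
          rw [h2]
          simp
        · have hb := ihb idx hf
          have h2 := ihs (cur ++ [x]) atoms
          rw [hf] at h2
          rw [h2]
          dsimp only
          have hm : idx - (start + j) + 1 = (idx - (start + j + 1) + 1) + 1 := by omega
          rw [hm]
          simp [List.append_assoc, Nat.add_assoc]

theorem goA_eq_feed (n : Nat) : ∀ (eq : List Char) (i : Nat) (rest prev temp : List Char)
    (out : List (List Char)), rest.length ≤ n → rest = eq.drop i →
    goA eq i rest prev temp out = feed (splitAux rest 0 [] []) prev temp out := by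
  induction n with
  | zero =>
    intro eq i rest prev temp out hlen hrest
    have hnil : rest = [] := by
      cases rest with
      | nil => rfl
      | cons a b => simp at hlen
    subst hnil
    simp [goA, splitAux, feed, groupRun]
  | succ n ih =>
    intro eq i rest prev temp out hlen hrest
    cases rest with
    | nil => simp [goA, splitAux, feed, groupRun]
    | cons c cs =>
      have hcs : cs = eq.drop (i + 1) := by
        have hh : (eq.drop i).tail = eq.drop (i + 1) := List.tail_drop
        rw [← hrest] at hh
        simpa using hh
      have hlen' : cs.length ≤ n := by simp at hlen; omega
      obtain ⟨h, t, hS⟩ : ∃ h t, splitAux cs 0 [] [] = h :: t := by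
        rcases hx : splitAux cs 0 [] [] with _ | ⟨h, t⟩
        · exact absurd hx (splitAux_ne_nil _ _ _ _)
        · exact ⟨h, t, rfl⟩
      by_cases hop : c = '+' ∨ c = '-'
      · -- top-level operator: a new atom starts here
        have hS' : splitAux cs 0 [c] [] = ([c] ++ h) :: t := by
          rw [splitAux_cur, hS]; rfl
        have hsplit : splitAux (c :: cs) 0 [] [] = [] :: ([c] ++ h) :: t := by
          simp only [splitAux]
          split_ifs with hcond
          · rw [splitAux_append, hS']; rfl
          all_goals exact absurd ⟨trivial, hop⟩ hcond
        simp only [goA]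
        rw [if_pos hop, hsplit]
        show _ = groupRun (([c] ++ h) :: t) prev (temp ++ []) out
        rw [List.append_nil]
        simp only [groupRun]
        split_ifs with h1 h2 h3
        · rw [ih eq (i+1) cs [] [c] (out ++ [prev ++ temp]) hlen' hcs, hS]
          rfl
        · rw [ih eq (i+1) cs temp [c] (out ++ [prev]) hlen' hcs, hS]
          rfl
        · rw [ih eq (i+1) cs temp [c] out hlen' hcs, hS]
          rfl
        · rw [ih eq (i+1) cs prev (temp ++ [c]) out hlen' hcs, hS]
          show groupRun t prev (temp ++ [c] ++ h) out = _
          rw [List.append_assoc]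
      · by_cases hpar : c = '('
        · -- parenthesized group
          subst hpar
          have hget : PySem.List.pyGet? eq (i : Int) = some '(' := by
            rw [PySem.List.pyGet?_natCast]
            have h0 : (eq.drop i)[0]? = eq[i + 0]? := List.getElem?_drop
            rw [← hrest] at h0
            simpa using h0.symm
          have hfpe0 : find_parenthesis_end eq i =
              (match fpeGo i 1 0 cs with | some idx => idx | none => eq.length - 1) := by
            unfold find_parenthesis_end
            rw [if_pos hget, ← hrest]
            simp only [fpeGo]
            norm_num
          obtain ⟨hBnd, hSpl⟩ := fpeGo_split cs i 1 0 (le_refl 0)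
          have hrsplit : splitAux ('(' :: cs) 0 [] [] = splitAux cs 1 ['('] [] := by
            simp only [splitAux]
            rw [if_neg (by rintro ⟨-, hx⟩; exact hop hx)]
            simp
          have hlenrest : cs.length + 1 = eq.length - i ∧ i < eq.length := by
            have hl : (eq.drop i).length = eq.length - i := List.length_drop
            rw [← hrest] at hl
            simp at hl
            omega
          simp only [goA]
          rw [if_neg hop, if_pos trivial]
          rcases hf : fpeGo i 1 0 cs with _ | idx
          · -- unbalanced: the tail is swallowed
            have hii : find_parenthesis_end eq i = eq.length - 1 := by rw [hfpe0, hf]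
            rw [hii]
            have hslice : PySem.List.slice eq (some (i : Int))
                (some ((eq.length - 1 + 1 : Nat) : Int)) = '(' :: cs := by
              rw [PySem.List.slice_natCast, ← hrest]
              have h9 : eq.length - 1 + 1 - i = cs.length + 1 := by omega
              rw [h9]
              exact List.take_of_length_le (by simp)
            have hdrop : cs.drop (eq.length - 1 - i) = ([] : List Char) :=
              List.drop_eq_nil_of_le (by omega)
            rw [hslice, hdrop, hrsplit]
            have hnone := hSpl ['('] []
            rw [hf] at hnone
            norm_num at hnone
            rw [hnone]
            simp only [feed, goA, groupRun]
          · -- balanced group ending at the matching close parenthesis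
            have hii : find_parenthesis_end eq i = idx := by rw [hfpe0, hf]
            rw [hii]
            obtain ⟨hb1, hb2⟩ := hBnd idx hf
            have hm : idx - (i + 1) + 1 = idx - i := by omega
            have hslice : PySem.List.slice eq (some (i : Int))
                (some ((idx + 1 : Nat) : Int)) = '(' :: cs.take (idx - i) := by
              rw [PySem.List.slice_natCast, ← hrest]
              have h9 : idx + 1 - i = (idx - i) + 1 := by omega
              rw [h9]
              rfl
            have hsome := hSpl ['('] []
            rw [hf] at hsome
            dsimp only at hsome
            rw [hm, show ((0:Int)+1) = 1 from by norm_num] at hsome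
            have hdropeq : cs.drop (idx - i) = eq.drop (idx + 1) := by
              rw [hcs, List.drop_drop]
              congr 1
              omega
            have hlen2 : (cs.drop (idx - i)).length ≤ n := by
              have h8 : (cs.drop (idx - i)).length = cs.length - (idx - i) := List.length_drop
              omega
            rcases hS2 : splitAux (cs.drop (idx - i)) 0 [] [] with _ | ⟨h2, t2⟩
            · exact absurd hS2 (splitAux_ne_nil _ _ _ _)
            rw [hslice]
            rw [ih eq (idx + 1) (cs.drop (idx - i)) prev (temp ++ ('(' :: cs.take (idx - i))) out hlen2 hdropeq]
            rw [hrsplit, hsome, splitAux_cur (cs.drop (idx - i)) 0 (['('] ++ cs.take (idx - i)), hS2]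
            simp [feed, hdCons, List.append_assoc]
        · -- ordinary character
          have hS' : splitAux cs 0 [c] [] = ([c] ++ h) :: t := by
            rw [splitAux_cur, hS]; rfl
          have hsplit : splitAux (c :: cs) 0 [] [] = ([c] ++ h) :: t := by
            simp only [splitAux]
            rw [if_neg (by rintro ⟨-, hx⟩; exact hop hx)]
            have hd : (if c = '(' then (0:Int) + 1 else if c = ')' ∧ (0:Int) > 0 then 0 - 1 else 0) = 0 := by
              rw [if_neg hpar, if_neg (by rintro ⟨-, hx⟩; omega)]
            rw [hd]
            simpa using hS'
          simp only [goA]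
          rw [if_neg hop, if_neg hpar, hsplit]
          rw [ih eq (i+1) cs prev (temp ++ [c]) out hlen' hcs, hS]
          show groupRun t prev (temp ++ [c] ++ h) out = feed (([c] ++ h) :: t) prev temp out
          simp only [feed]
          rw [List.append_assoc]

-- ===== VERDICT (by name: the statement is the Claim_ definition above) =====
theorem iterate_top_clusters_spec : Claim_equal_iterate_top_clusters := by
  intro equation _
  unfold Spec_iterate_top_clusters iterate_top_clusters iterate_top_clusters_alt
  have h := goA_eq_feed equation.toList.length equation.toList 0 equation.toList [] [] []
    (le_refl _) (by simp)
  rw [h]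
  rcases hS : splitAux equation.toList 0 [] [] with _ | ⟨t, ts⟩
  · exact absurd hS (splitAux_ne_nil _ _ _ _)
  · simp [feed]
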